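-- pv_equiv track=rewrite | github.com/tmu-nlp/100knock2024 | okabe/chapter09/knock80.py | make_word2id_dict
-- ===== SOURCE A (Python) =====
-- from collections import defaultdict
-- import string
--
-- def make_word2id_dict(text_list):
--     d = defaultdict(int)
--     #句読点をスペースに変換するテーブル
--     table = str.maketrans(string.punctuation, ' '*len(string.punctuation))
--     for text in text_list:
--         for word in text.translate(table).split():
--             d[word] += 1
--     d = sorted(d.items(), key=lambda x:x[1], reverse=True)
--
--     #出現2回以上にid
--     word2id = {word: i + 1 for i, (word, cnt) in enumerate(d) if cnt > 1}
--     return word2id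
-- ===== SOURCE B (Python) =====
-- import string
--
--
-- def make_word2id_dict(text_list):
--     # count words (punctuation replaced by spaces), first-appearance order
--     counts = {}
--     for text in text_list:
--         cleaned = ''.join(' ' if ch in string.punctuation else ch for ch in text)
--         for word in cleaned.split():
--             counts[word] = counts.get(word, 0) + 1
--     # bucket words by their count instead of sorting
--     buckets = {}
--     for word, cnt in counts.items():
--         buckets.setdefault(cnt, []).append(word)
--     # walk counts from the maximum down to 2, handing out consecutive ids
--     word2id = {}
--     next_id = 1
--     for c in range(max(buckets, default=1), 1, -1):
--         for word in buckets.get(c, []):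
--             word2id[word] = next_id
--             next_id += 1
--     return word2id
-- ===== Notes on version B (the rewrite author's own statement) =====
-- stated objective: alternative
-- what changed: B replaces A's comparison sort of the count dict plus enumerate-and-filter id assignment by a bucket pass: words are grouped into a count->words dict in first-appearance order, then ids are handed out sequentially while walking the counts from the maximum down to 2, so no sort is performed.
import Mathlib
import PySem

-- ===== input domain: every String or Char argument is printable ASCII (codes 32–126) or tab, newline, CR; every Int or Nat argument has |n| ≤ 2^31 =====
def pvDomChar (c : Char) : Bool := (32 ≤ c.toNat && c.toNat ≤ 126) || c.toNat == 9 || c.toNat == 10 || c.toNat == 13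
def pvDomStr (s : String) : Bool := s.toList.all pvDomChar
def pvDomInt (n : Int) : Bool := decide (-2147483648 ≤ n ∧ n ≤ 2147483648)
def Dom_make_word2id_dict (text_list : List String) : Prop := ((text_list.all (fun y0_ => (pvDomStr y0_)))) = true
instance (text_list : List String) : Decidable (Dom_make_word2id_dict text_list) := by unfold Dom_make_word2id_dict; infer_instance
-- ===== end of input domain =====

-- B replaces A's stable comparison sort of the count dict (count desc) + enumerate/filter id assignment
-- by a count->words bucket dict walked from the maximum count down to 2 with sequential ids (objective: alternative).

-- ===== PORT A =====
-- string.punctuation (32 ASCII characters); the maketrans table sends each of them to ' '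
def pyPunct : List Char := "!\"#$%&'()*+,-./:;<=>?@[\\]^_`{|}~".toList

-- text.translate(table): per-character map, punctuation → ' ' (exact: the table and Dom are ASCII;
-- it is also the map computed by B's "''.join(' ' if ch in string.punctuation else ch for ch in text)")
def pyTranslate (s : String) : String :=
  String.ofList (s.toList.map (fun c => if pyPunct.contains c then ' ' else c))

def make_word2id_dict (text_list : List String) : List (String × Int) :=
  -- d = defaultdict(int); for text: for word in text.translate(table).split(): d[word] += 1
  let d : PySem.Dict String Int :=
    text_list.foldl (fun d text =>
      (PySem.Str.split₀ (pyTranslate text)).foldl (fun d w => d.insert w (d.getD w 0 + 1)) d)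
      PySem.Dict.empty
  -- d = sorted(d.items(), key=lambda x: x[1], reverse=True)
  let ds := PySem.List.sorted d.items (fun x => x.2) true
  -- {word: i + 1 for i, (word, cnt) in enumerate(d) if cnt > 1}
  ((PySem.List.enumerate ds).foldl
      (fun w2i p => if p.2.2 > 1 then w2i.insert p.2.1 (p.1 + 1) else w2i)
      (PySem.Dict.empty : PySem.Dict String Int)).items

-- ===== PORT B =====
def make_word2id_dict_alt (text_list : List String) : List (String × Int) :=
  -- counts[word] = counts.get(word, 0) + 1 over the words of each cleaned text
  let counts : PySem.Dict String Int :=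
    text_list.foldl (fun d text =>
      (PySem.Str.split₀ (pyTranslate text)).foldl (fun d w => d.insert w (d.getD w 0 + 1)) d)
      PySem.Dict.empty
  -- buckets.setdefault(cnt, []).append(word)
  let buckets : PySem.Dict Int (List String) :=
    counts.items.foldl (fun b p => b.modify p.2 [] (fun ws => ws ++ [p.1])) PySem.Dict.empty
  -- for c in range(max(buckets, default=1), 1, -1): for word in buckets.get(c, []): hand out next_id
  let st :=
    (PySem.List.pyRange (PySem.List.maxD buckets.keys (fun c => c) 1) 1 (-1)).foldl
      (fun s c => (buckets.getD c []).foldl (fun s w => (s.1.insert w s.2, s.2 + 1)) s)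
      ((PySem.Dict.empty : PySem.Dict String Int), (1 : Int))
  st.1.items

-- ===== PRECONDITION & SPEC =====
def Spec_make_word2id_dict (text_list : List String) (out : List (String × Int)) : Prop := out = make_word2id_dict_alt text_list
instance (text_list : List String) (out : List (String × Int)) : Decidable (Spec_make_word2id_dict text_list out) := by unfold Spec_make_word2id_dict; infer_instance

-- ===== CLAIM (what is proved, stated in full; the proofs are below) =====
def Claim_equal_make_word2id_dict : Prop := ∀ (text_list : List String), Dom_make_word2id_dict text_list → Spec_make_word2id_dict text_list (make_word2id_dict text_list)

-- ===== LEMMAS AND PROOFS =====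

-- list(range(M, 1, -1)), structurally
def descRange (M : Int) : List Int :=
  if 2 ≤ M then M :: descRange (M - 1) else []
termination_by (M - 1).toNat
decreasing_by omega

-- the words of text_list after punctuation removal, in order
def pvWords (text_list : List String) : List String :=
  text_list.flatMap (fun text => PySem.Str.split₀ (pyTranslate text))

-- the bucket slice of an items list l at count c, as pairs
def pvBkt (l : List (String × Int)) (c : Int) : List (String × Int) :=
  l.filter (fun p => p.2 == c)

-- the count>1 part of the stably count-desc sorted items list, in grouped form
def pvGrouped (M : Int) (l : List (String × Int)) : List (String × Int) :=
  (descRange M).flatMap (pvBkt l)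

theorem pvMem_descRange {c M : Int} : c ∈ descRange M ↔ 2 ≤ c ∧ c ≤ M := by
  induction M using descRange.induct with
  | case1 M h ih => rw [descRange, if_pos h]; simp only [List.mem_cons, ih]; omega
  | case2 M h => rw [descRange, if_neg h]; simp only [List.not_mem_nil, false_iff]; omega

theorem pvPyRange_down (N : Int) :
    PySem.List.pyRange N 1 (-1)
      = (List.range (if 1 < N then N.toNat - 1 else 0)).map
          (fun (k : Nat) => N + (-1) * (k : Int)) := by
  unfold PySem.List.pyRange
  norm_num

theorem pvPyRange_eq_descRange (M : Int) : PySem.List.pyRange M 1 (-1) = descRange M := by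
  induction M using descRange.induct with
  | case1 M h ih =>
    rw [descRange, if_pos h, ← ih, pvPyRange_down M, pvPyRange_down (M - 1)]
    rw [if_pos (by omega : (1:Int) < M)]
    have hn : M.toNat - 1 = (if 1 < M - 1 then (M - 1).toNat - 1 else 0) + 1 := by
      split_ifs with h' <;> omega
    rw [hn, List.range_succ_eq_map, List.map_cons, List.map_map]
    congr 1
    · norm_num
    · refine List.map_congr_left (fun k _ => ?_)
      simp only [Function.comp_apply, Nat.succ_eq_add_one]
      push_cast
      ring
  | case2 M h =>
    rw [descRange, if_neg h, pvPyRange_down M]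
    rw [if_neg (by omega : ¬ (1:Int) < M)]
    rfl

theorem pvInsertBy_skip {α : Type} (before : α → α → Bool) (x : α) (ys zs : List α)
    (h : ∀ y ∈ ys, before x y = false) :
    PySem.List.insertBy before x (ys ++ zs) = ys ++ PySem.List.insertBy before x zs := by
  induction ys with
  | nil => simp
  | cons y ys ih =>
    have hy : before x y = false := h y (by simp)
    simp only [List.cons_append, PySem.List.insertBy, hy, Bool.false_eq_true, if_false]
    rw [ih (fun y' hy' => h y' (by simp [hy']))]

theorem pvInsertBy_front {α : Type} (before : α → α → Bool) (x : α) (ws : List α)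
    (h : ∀ y ∈ ws, before x y = true) :
    PySem.List.insertBy before x ws = x :: ws := by
  cases ws with
  | nil => simp [PySem.List.insertBy]
  | cons w ws => simp [PySem.List.insertBy, h w (by simp)]

theorem pvMem_grouped {l : List (String × Int)} {M : Int} {y : String × Int}
    (h : y ∈ pvGrouped M l) : y ∈ l ∧ 2 ≤ y.2 ∧ y.2 ≤ M := by
  simp only [pvGrouped, List.mem_flatMap] at h
  obtain ⟨c, hc, hy⟩ := h
  rw [pvMem_descRange] at hc
  simp only [pvBkt, List.mem_filter, beq_iff_eq] at hy
  exact ⟨hy.1, by omega⟩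

theorem pvGrouped_cons {M : Int} (h : 2 ≤ M) (l : List (String × Int)) :
    pvGrouped M l = pvBkt l M ++ pvGrouped (M - 1) l := by
  rw [pvGrouped, descRange, if_pos h, List.flatMap_cons]; rfl

theorem pvBkt_append_ne {l : List (String × Int)} {x : String × Int} {c : Int}
    (h : x.2 ≠ c) : pvBkt (l ++ [x]) c = pvBkt l c := by
  simp only [pvBkt, List.filter_append, List.filter_cons, List.filter_nil]
  have hx : (x.2 == c) = false := by simp [h]
  simp [hx]

theorem pvBkt_append_eq {l : List (String × Int)} {x : String × Int} {c : Int}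
    (h : x.2 = c) : pvBkt (l ++ [x]) c = pvBkt l c ++ [x] := by
  simp only [pvBkt, List.filter_append, List.filter_cons, List.filter_nil]
  have hx : (x.2 == c) = true := by simp [h]
  simp [hx]

theorem pvGrouped_append_of_ne {N : Int} {x : String × Int} {l : List (String × Int)}
    (h : ∀ c ∈ descRange N, x.2 ≠ c) : pvGrouped N (l ++ [x]) = pvGrouped N l := by
  simp only [pvGrouped]
  exact List.flatMap_congr (fun c hc => pvBkt_append_ne (h c hc))

theorem pvInsert_grouped (M : Int) (x : String × Int) (l : List (String × Int))
    (hx2 : 2 ≤ x.2) (hxM : x.2 ≤ M) :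
    PySem.List.insertBy (fun a b => decide (b.2 < a.2)) x
        (pvGrouped M l ++ l.filter (fun p => p.2 == 1))
      = pvGrouped M (l ++ [x]) ++ l.filter (fun p => p.2 == 1) := by
  revert hxM
  induction M using descRange.induct with
  | case1 M h ih =>
    intro hxM
    rw [pvGrouped_cons h l, pvGrouped_cons h (l ++ [x])]
    by_cases hxe : x.2 = M
    · have hskip : ∀ y ∈ pvBkt l M, (fun a b => decide (b.2 < a.2)) x y = false := by
        intro y hy
        simp only [pvBkt, List.mem_filter, beq_iff_eq] at hy
        simp only [decide_eq_false_iff_not]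
        omega
      have hfront : ∀ y ∈ pvGrouped (M - 1) l ++ l.filter (fun p => p.2 == 1),
          (fun a b => decide (b.2 < a.2)) x y = true := by
        intro y hy
        rcases List.mem_append.mp hy with hy | hy
        · have := (pvMem_grouped hy).2.2
          simp only [decide_eq_true_eq]; omega
        · simp only [List.mem_filter, beq_iff_eq] at hy
          simp only [decide_eq_true_eq]; omega
      rw [List.append_assoc, pvInsertBy_skip _ _ _ _ hskip, pvInsertBy_front _ _ _ hfront,
        pvBkt_append_eq hxe, pvGrouped_append_of_ne
          (fun c hc => by have := pvMem_descRange.mp hc; omega)]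
      simp
    · have hskip : ∀ y ∈ pvBkt l M, (fun a b => decide (b.2 < a.2)) x y = false := by
        intro y hy
        simp only [pvBkt, List.mem_filter, beq_iff_eq] at hy
        simp only [decide_eq_false_iff_not]
        omega
      rw [List.append_assoc, pvInsertBy_skip _ _ _ _ hskip, ih (by omega),
        pvBkt_append_ne hxe, List.append_assoc]
  | case2 M h =>
    intro hxM
    exact absurd (hx2.trans hxM) h

theorem pvSorted_eq_grouped (l : List (String × Int)) (M : Int)
    (h1 : ∀ p ∈ l, 1 ≤ p.2) (h2 : ∀ p ∈ l, p.2 ≤ M) :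
    PySem.List.sorted l (fun x => x.2) true
      = pvGrouped M l ++ l.filter (fun p => p.2 == 1) := by
  induction l using List.reverseRecOn with
  | nil =>
    rw [show PySem.List.sorted ([] : List (String × Int)) (fun x => x.2) true = []
      from (PySem.List.sorted_eq_nil_iff _ _ _).mpr rfl]
    simp [pvGrouped, pvBkt]
  | append_singleton l x ih =>
    have hl' : ∀ p ∈ l, 1 ≤ p.2 := fun p hp => h1 p (List.mem_append_left _ hp)
    have h2' : ∀ p ∈ l, p.2 ≤ M := fun p hp => h2 p (List.mem_append_left _ hp)
    have hstep : PySem.List.sorted (l ++ [x]) (fun x => x.2) true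
        = PySem.List.insertBy (fun a b => decide (b.2 < a.2)) x
            (PySem.List.sorted l (fun x => x.2) true) := by
      rw [PySem.List.sorted_rev_eq_foldl_insertBy (l ++ [x]),
        PySem.List.sorted_rev_eq_foldl_insertBy l, List.foldl_append, List.foldl_cons,
        List.foldl_nil]
    rw [hstep, ih hl' h2']
    by_cases hx2 : 2 ≤ x.2
    · rw [pvInsert_grouped M x l hx2 (h2 x (by simp))]
      have hf : (l ++ [x]).filter (fun p => p.2 == 1) = l.filter (fun p => p.2 == 1) := by
        simp only [List.filter_append, List.filter_cons, List.filter_nil]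
        have hx : (x.2 == 1) = false := by simp only [beq_eq_false_iff_ne, ne_eq]; omega
        simp [hx]
      rw [hf]
    · have hx1 : x.2 = 1 := by have := h1 x (by simp); omega
      have hnb : ∀ y ∈ pvGrouped M l ++ l.filter (fun p => p.2 == 1),
          (fun a b => decide (b.2 < a.2)) x y = false := by
        intro y hy
        rcases List.mem_append.mp hy with hy | hy
        · have := (pvMem_grouped hy).2.1
          simp only [decide_eq_false_iff_not]; omega
        · have := hl' y (List.mem_of_mem_filter hy)
          simp only [decide_eq_false_iff_not]; omega
      rw [PySem.List.insertBy_of_forall_not_before _ _ _ hnb,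
        pvGrouped_append_of_ne (fun c hc => by have := pvMem_descRange.mp hc; omega)]
      have hf : (l ++ [x]).filter (fun p => p.2 == 1) = l.filter (fun p => p.2 == 1) ++ [x] := by
        simp only [List.filter_append, List.filter_cons, List.filter_nil]
        have hx : (x.2 == 1) = true := by simp [hx1]
        simp [hx]
      rw [hf, List.append_assoc]

-- the counting phase is Counter(words)
theorem pvCount_eq_counter (text_list : List String) :
    text_list.foldl (fun d text =>
        (PySem.Str.split₀ (pyTranslate text)).foldl (fun d w => d.insert w (d.getD w 0 + 1)) d)
        PySem.Dict.empty
      = PySem.Dict.counter (pvWords text_list) := by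
  rw [pvWords, ← List.foldl_flatMap (f := fun text => PySem.Str.split₀ (pyTranslate text))
    (g := fun (d : PySem.Dict String Int) (w : String) => d.insert w (d.getD w 0 + 1))
    (l := text_list) (init := PySem.Dict.empty)]
  exact PySem.Dict.foldl_insert_getD_add_one_eq_counter _

-- B's id-assignment loop over a word list, in closed form
theorem pvStateFold (ws : List String) (d : PySem.Dict String Int) (n : Int) :
    ws.foldl (fun s w => (s.1.insert w s.2, s.2 + 1)) (d, n)
      = ((PySem.List.enumerate ws n).foldl (fun d p => d.insert p.2 p.1) d, n + ws.length) := by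
  induction ws generalizing d n with
  | nil => simp [PySem.List.enumerate_nil]
  | cons w ws ih =>
    simp only [List.foldl_cons, PySem.List.enumerate_cons]
    rw [ih]
    simp only [Prod.mk.injEq, List.length_cons, true_and]
    push_cast
    ring

theorem pvEnumerate_shift (G : List (String × Int)) (s : Int) :
    (PySem.List.enumerate G s).map (fun p => (p.2.1, p.1 + 1))
      = (PySem.List.enumerate (G.map (fun p => p.1)) (s + 1)).map (fun p => (p.2, p.1)) := by
  induction G generalizing s with
  | nil => simp [PySem.List.enumerate_nil]
  | cons g G ih => simp only [List.map_cons, PySem.List.enumerate_cons, ih]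

theorem pvLe_maxD {xs : List Int} {x d : Int} (h : x ∈ xs) :
    x ≤ PySem.List.maxD xs (fun c => c) d := by
  cases hm : PySem.List.max? xs (fun c => c) with
  | none =>
    rw [PySem.List.max?_eq_none_iff] at hm
    subst hm
    cases h
  | some m =>
    have := PySem.List.max?_isMax hm x h
    simp only [PySem.List.maxD, hm, Option.getD_some]
    exact this

-- the two programs agree on any items list with distinct words and positive counts
theorem pvMain (l : List (String × Int))
    (hnd : (l.map (fun p => p.1)).Nodup) (h1 : ∀ p ∈ l, 1 ≤ p.2) :
    ((PySem.List.enumerate (PySem.List.sorted l (fun x => x.2) true)).foldl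
        (fun w2i p => if p.2.2 > 1 then w2i.insert p.2.1 (p.1 + 1) else w2i)
        (PySem.Dict.empty : PySem.Dict String Int)).items
      = ((PySem.List.pyRange
            (PySem.List.maxD
              (l.foldl (fun b p => b.modify p.2 [] (fun ws => ws ++ [p.1]))
                (PySem.Dict.empty : PySem.Dict Int (List String))).keys
              (fun c => c) 1) 1 (-1)).foldl
          (fun s c => ((l.foldl (fun b p => b.modify p.2 [] (fun ws => ws ++ [p.1]))
                (PySem.Dict.empty : PySem.Dict Int (List String))).getD c []).foldl
              (fun s w => (s.1.insert w s.2, s.2 + 1)) s)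
          ((PySem.Dict.empty : PySem.Dict String Int), (1 : Int))).1.items := by
  have hswap : (fun (b : PySem.Dict Int (List String)) (p : String × Int) =>
        b.modify p.2 [] (fun ws => ws ++ [p.1]))
      = (fun b p => PySem.Dict.modify b ((fun (q : String × Int) => q.2) p) []
          ((fun (_ : PySem.Dict Int (List String)) (q : String × Int) =>
            (fun ws => ws ++ [q.1])) b p)) := rfl
  have hkeys : (l.foldl (fun b p => b.modify p.2 [] (fun ws => ws ++ [p.1]))
        (PySem.Dict.empty : PySem.Dict Int (List String))).keys
      = PySem.Set.ofList (l.map (fun q => q.2)) := by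
    rw [hswap, PySem.Dict.keys_foldl_modify_key,
      show (PySem.Dict.empty : PySem.Dict Int (List String)).keys = [] from rfl]
    exact PySem.Set.update_nil_left _
  have hgetD : ∀ c, (l.foldl (fun b p => b.modify p.2 [] (fun ws => ws ++ [p.1]))
        (PySem.Dict.empty : PySem.Dict Int (List String))).getD c []
      = (pvBkt l c).map (fun p => p.1) := by
    intro c
    have e1 : (fun (b : PySem.Dict Int (List String)) (p : String × Int) =>
          b.modify p.2 [] (fun ws => ws ++ [p.1]))
        = (fun b p => (fun (d : PySem.Dict Int (List String)) (q : Int × String) =>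
            d.modify q.1 [] (fun ws => ws ++ [q.2])) b (Prod.swap p)) := rfl
    rw [e1, ← List.foldl_map (f := Prod.swap)
      (g := fun (d : PySem.Dict Int (List String)) (q : Int × String) =>
        d.modify q.1 [] (fun ws => ws ++ [q.2])),
      PySem.Dict.getD_foldl_modify_append,
      show (PySem.Dict.empty : PySem.Dict Int (List String)).getD c [] = [] from rfl,
      List.filter_map, List.map_map, List.nil_append]
    rfl
  rw [hkeys]
  set M := PySem.List.maxD (PySem.Set.ofList (l.map (fun q => q.2))) (fun c => c) 1 with hM
  have h2 : ∀ p ∈ l, p.2 ≤ M :=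
    fun p hp => pvLe_maxD ((PySem.Set.mem_ofList _ _).mpr (List.mem_map_of_mem hp))
  have hsorted := pvSorted_eq_grouped l M h1 h2
  have hGmem : ∀ y ∈ pvGrouped M l, 2 ≤ y.2 := fun y hy => (pvMem_grouped hy).2.1
  have hFmem : ∀ y ∈ l.filter (fun p => p.2 == 1), y.2 = 1 := by
    intro y hy
    have := (List.mem_filter.mp hy).2
    simpa using this
  have hndG1 : ((pvGrouped M l).map (fun p => p.1)).Nodup := by
    have hperm : (PySem.List.sorted l (fun x => x.2) true).Perm l :=
      PySem.List.sorted_perm l _ true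
    rw [hsorted] at hperm
    have hnd2 := (hperm.map (fun p => p.1)).nodup_iff.mpr hnd
    rw [List.map_append] at hnd2
    exact hnd2.of_append_left
  set G := pvGrouped M l with hG
  set F := l.filter (fun p => p.2 == 1) with hF
  -- ===== A side =====
  rw [hsorted, PySem.List.enumerate_append,
    PySem.List.foldl_ite_eq_foldl_filter (p := fun p : Int × (String × Int) => p.2.2 > 1)
      (f := fun (w2i : PySem.Dict String Int) (p : Int × (String × Int)) =>
        w2i.insert p.2.1 (p.1 + 1))]
  have hfilter : (PySem.List.enumerate G 0 ++ PySem.List.enumerate F (0 + G.length)).filter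
      (fun p => decide (p.2.2 > 1)) = PySem.List.enumerate G 0 := by
    rw [List.filter_append, List.filter_eq_self.mpr ?_, List.filter_eq_nil_iff.mpr ?_,
      List.append_nil]
    · intro p hp
      obtain ⟨k, hk, rfl⟩ := (PySem.List.mem_enumerate_iff _ _ _).mp hp
      have := hFmem _ (List.getElem_mem hk)
      simp only [decide_eq_true_eq]
      omega
    · intro p hp
      obtain ⟨k, hk, rfl⟩ := (PySem.List.mem_enumerate_iff _ _ _).mp hp
      have := hGmem _ (List.getElem_mem hk)
      simp only [decide_eq_true_eq]
      omega
  rw [hfilter]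
  have hmapA : (PySem.List.enumerate G 0).map (fun p => p.2.1) = G.map (fun p => p.1) := by
    rw [show (fun p : Int × (String × Int) => p.2.1)
      = (fun q : String × Int => q.1) ∘ (fun p : Int × (String × Int) => p.2) from rfl,
      ← List.map_map, PySem.List.map_snd_enumerate]
  rw [PySem.Dict.items_foldl_insert_fresh (PySem.List.enumerate G 0)
    (fun p => p.2.1) (fun p => p.1 + 1) PySem.Dict.empty (fun a _ => rfl)
    (by rw [hmapA]; exact hndG1)]
  -- ===== B side =====
  rw [pvPyRange_eq_descRange,
    PySem.List.foldl_congr_mem _ _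
      (fun (s : PySem.Dict String Int × Int) (c : Int) => ((pvBkt l c).map (fun p => p.1)).foldl
        (fun s w => (s.1.insert w s.2, s.2 + 1)) s) _
      (fun s c _ => by rw [hgetD c]),
    ← List.foldl_flatMap (f := fun (c : Int) => (pvBkt l c).map (fun p => p.1))
      (g := fun (s : PySem.Dict String Int × Int) (w : String) => (s.1.insert w s.2, s.2 + 1))
      (l := descRange M) (init := (PySem.Dict.empty, 1))]
  have hWG : (descRange M).flatMap (fun c => (pvBkt l c).map (fun p => p.1))
      = G.map (fun p => p.1) := by
    rw [hG, pvGrouped, List.map_flatMap]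
  rw [hWG, pvStateFold]
  have hmapB : (PySem.List.enumerate (G.map (fun p => p.1)) 1).map (fun p => p.2)
      = G.map (fun p => p.1) := PySem.List.map_snd_enumerate _ _
  rw [show ((PySem.List.enumerate (G.map (fun p => p.1)) 1).foldl
      (fun d p => d.insert p.2 p.1) PySem.Dict.empty,
      (1 : Int) + ((G.map (fun p => p.1)).length : Int)).1
    = (PySem.List.enumerate (G.map (fun p => p.1)) 1).foldl
      (fun d p => d.insert p.2 p.1) PySem.Dict.empty from rfl]
  rw [PySem.Dict.items_foldl_insert_fresh (PySem.List.enumerate (G.map (fun p => p.1)) 1)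
    (fun p => p.2) (fun p => p.1) PySem.Dict.empty (fun a _ => rfl)
    (by rw [hmapB]; exact hndG1)]
  rw [show (PySem.Dict.empty : PySem.Dict String Int).items = [] from rfl,
    List.nil_append, List.nil_append]
  have := pvEnumerate_shift G 0
  norm_num at this
  exact this

-- ===== VERDICT (by name: the statement is the Claim_ definition above) =====
theorem make_word2id_dict_spec : Claim_equal_make_word2id_dict := by
  intro tl _
  unfold Spec_make_word2id_dict
  simp only [make_word2id_dict, make_word2id_dict_alt]
  rw [pvCount_eq_counter, PySem.Dict.items_counter]
  refine pvMain _ ?_ ?_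
  · rw [List.map_map]
    rw [show ((fun p : String × Int => p.1) ∘ fun k => (k, (List.count k (pvWords tl) : Int)))
      = id from rfl, List.map_id]
    exact PySem.Set.nodup_ofList _
  · intro p hp
    obtain ⟨k, hk, rfl⟩ := List.mem_map.mp hp
    have hkW : k ∈ pvWords tl := (PySem.Set.mem_ofList _ _).mp hk
    have hc : 0 < List.count k (pvWords tl) := List.count_pos_iff.mpr hkW
    show (1 : Int) ≤ (List.count k (pvWords tl) : Int)
    exact_mod_cast hc
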